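-- pv_equiv track=rewrite | github.com/W-Thurston/Advent-of-Code-Lets-Learn | src/aoc2025/solutions/day07/optimized.py | part2
-- ===== SOURCE A (Python) =====
-- def _parse_grid(data: list[str]) -> list[list[str]]:
--     """Convert input strings to character grid."""
--     return [list(row) for row in data]
--
-- def part2(data: list[str]) -> int:
--     """Fast Dynamic Programming for quantum many-worlds timeline splitting."""
--     grid: list[list[str]] = _parse_grid(data)
--     height: int = len(grid)
--     width: int = len(grid[0])
--
--     # Dynamic Programming rows reused in a rolling fashion (memory efficient)
--     prev: list[int] = [0] * width
--     curr: list[int] = [0] * width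
--
--     # Start at S
--     start_col: int = grid[0].index("S")
--     prev[start_col] = 1
--
--     for row in range(1, height):
--         curr = [0] * width  # reset fast
--
--         # Use direct indexing for speed
--         grid_row: list[str] = grid[row]
--
--         for col, count in enumerate(prev):
--             if count == 0:
--                 continue
--
--             if grid_row[col] == "^":
--                 # Split timelines
--                 left: int = col - 1
--                 right: int = col + 1
--
--                 if left >= 0:
--                     curr[left] += count
--                 if right < width:
--                     curr[right] += count
--
--             else:
--                 curr[col] += count
--
--         prev = curr
--
--     return sum(prev)
-- ===== SOURCE B (Python) =====
-- def part2(data: list[str]) -> int: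
--     """Reverse DP: for each cell, count final timelines reachable from it (bottom-up sweep);
--     the answer is that count at the start cell -- no occupancy vector, no final summation."""
--     width = len(data[0])
--     ways = [1] * width
--     for row in reversed(data[1:]):
--         ways = [
--             (ways[col - 1] if col >= 1 else 0) + (ways[col + 1] if col + 1 < width else 0)
--             if row[col] == "^"
--             else ways[col]
--             for col in range(width)
--         ]
--     return ways[data[0].index("S")]
-- ===== Notes on version B (the rewrite author's own statement) =====
-- stated objective: alternative
-- what changed: A propagates an occupancy vector of timeline counts forward from S (scatter into a mutable curr, skipping zero counts) and sums it at the end; B runs the DP in the opposite direction, sweeping the grid bottom-up to compute for each cell the number of final timelines reachable from it, and simply reads that count off at the start cell -- no start vector, no zero-skip, no final sum.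
-- outside the precondition, e.g. on part2(['S.', '.']): A returns 1, B raises IndexError
import Mathlib
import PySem

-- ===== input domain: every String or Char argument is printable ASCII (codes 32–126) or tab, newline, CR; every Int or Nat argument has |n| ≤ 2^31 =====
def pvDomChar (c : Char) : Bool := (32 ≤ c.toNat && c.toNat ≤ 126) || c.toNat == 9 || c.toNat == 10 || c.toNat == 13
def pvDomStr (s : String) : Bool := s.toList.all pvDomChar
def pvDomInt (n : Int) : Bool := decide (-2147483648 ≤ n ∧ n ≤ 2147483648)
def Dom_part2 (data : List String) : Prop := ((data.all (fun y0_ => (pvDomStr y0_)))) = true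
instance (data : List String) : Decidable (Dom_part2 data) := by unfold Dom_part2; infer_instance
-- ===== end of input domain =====

-- B replaces A's forward scatter DP (occupancy counts pushed from S down the grid, summed at
-- the end) by the reverse DP: a bottom-up sweep computing, for each cell, the number of final
-- timelines reachable from it; the answer is read off at the start cell (objective: alternative).

-- ===== PORT A =====
-- one iteration of A's inner 'for col, count in enumerate(prev)' loop body
-- (indices are in range under Pre_; pyGetD/pySetD are the total forms of Python indexing/assignment)
def pvStepA (width : Int) (gridRow : List Char) (curr : List Int) (cc : Int × Int) : List Int :=
  if cc.2 = 0 then curr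
  else if PySem.List.pyGetD gridRow cc.1 ' ' = '^' then
    let left := cc.1 - 1
    let right := cc.1 + 1
    let curr1 := if 0 ≤ left then PySem.List.pySetD curr left (PySem.List.pyGetD curr left 0 + cc.2) else curr
    if right < width then PySem.List.pySetD curr1 right (PySem.List.pyGetD curr1 right 0 + cc.2) else curr1
  else PySem.List.pySetD curr cc.1 (PySem.List.pyGetD curr cc.1 0 + cc.2)

-- A's body of 'for row in range(1, height)': curr = [0]*width, then the scatter loop over enumerate(prev)
def pvScatterRow (width : Int) (gridRow : List Char) (prev : List Int) : List Int :=
  (PySem.List.enumerate prev).foldl (pvStepA width gridRow) (List.replicate width.toNat 0)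

def part2 (data : List String) : Int :=
  let grid : List (List Char) := data.map (fun row => row.toList)
  let height : Int := grid.length
  let first : List Char := grid.headD []
  let width : Int := first.length
  let startCol : Int := ((PySem.List.index? first 'S').getD 0 : Nat)
  let prev : List Int := PySem.List.pySetD (List.replicate width.toNat 0) startCol 1
  ((PySem.List.pyRange 1 height).foldl
    (fun prev row => pvScatterRow width (PySem.List.pyGetD grid row []) prev) prev).sum

-- ===== PORT B =====
-- Source B's per-cell reverse-DP expression: number of final timelines reachable from (row, col)
def pvBack (width : Int) (row : List Char) (ways : List Int) (col : Int) : Int :=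
  if PySem.List.pyGetD row col ' ' = '^' then
    (if 1 ≤ col then PySem.List.pyGetD ways (col - 1) 0 else 0)
    + (if col + 1 < width then PySem.List.pyGetD ways (col + 1) 0 else 0)
  else PySem.List.pyGetD ways col 0

-- Source B's list comprehension '[ ... for col in range(width)]'
def pvBackRow (width : Int) (row : List Char) (ways : List Int) : List Int :=
  (PySem.List.pyRange 0 width).map (pvBack width row ways)

def part2_alt (data : List String) : Int :=
  let rows : List (List Char) := data.map (fun r => r.toList)
  let first : List Char := rows.headD []
  let width : Int := first.length
  let ways0 : List Int := List.replicate width.toNat 1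
  let ways : List Int := ((PySem.List.slice rows (some 1) none).reverse).foldl
    (fun ways row => pvBackRow width row ways) ways0
  PySem.List.pyGetD ways ((PySem.List.index? first 'S').getD 0 : Nat) 0

-- ===== PRECONDITION & SPEC =====
-- Pre_ excludes exactly the inputs where the Python raises: empty input (IndexError on data[0]),
-- no 'S' in the first row (ValueError from .index), and rows shorter than the first row -- on those
-- A raises IndexError whenever a nonzero count reaches a missing column, and B always raises
-- IndexError; on the few short-row grids where no count reaches a missing column A still returns
-- while B raises (see cites in claim.json).
def Pre_part2 (data : List String) : Prop :=
  data ≠ [] ∧ 'S' ∈ (data.headD "").toList ∧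
    ∀ s ∈ data, (data.headD "").toList.length ≤ s.toList.length
instance (data : List String) : Decidable (Pre_part2 data) := by unfold Pre_part2; infer_instance

def pvWitness_part2 : List String := ["S.", ".^"]

def Spec_part2 (data : List String) (out : Int) : Prop := out = part2_alt data
instance (data : List String) (out : Int) : Decidable (Spec_part2 data out) := by unfold Spec_part2; infer_instance

-- ===== CLAIM (what is proved, stated in full; the proofs are below) =====
def Claim_equal_part2 : Prop := ∀ (data : List String), Dom_part2 data → Pre_part2 data → Spec_part2 data (part2 data)

-- ===== LEMMAS AND PROOFS =====
-- contribution of source column col holding c timelines to destination column j in one scatter step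
def pvContrib (W : Int) (row : List Char) (col c j : Int) : Int :=
  if PySem.List.pyGetD row col ' ' = '^' then
    (if 1 ≤ col ∧ j = col - 1 then c else 0) + (if col + 1 < W ∧ j = col + 1 then c else 0)
  else (if j = col then c else 0)

lemma pv_getD_set (l : List Int) (i : Nat) (v : Int) (j : Nat) (hi : i < l.length) :
    (l.set i v).getD j 0 = if j = i then v else l.getD j 0 := by
  rw [List.getD_eq_getElem?_getD, List.getD_eq_getElem?_getD, List.getElem?_set]
  by_cases h : j = i
  · simp [h, hi]
  · rw [if_neg (fun hh : i = j => h hh.symm), if_neg h]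

lemma pv_bump_getD (curr : List Int) (i : Int) (c : Int) (j : Nat)
    (h0 : 0 ≤ i) (h1 : i < (curr.length : Int)) :
    (PySem.List.pySetD curr i (PySem.List.pyGetD curr i 0 + c)).getD j 0
      = curr.getD j 0 + if (j : Int) = i then c else 0 := by
  rw [PySem.List.pySetD_of_nonneg _ _ h0, PySem.List.pyGetD_of_nonneg _ _ h0,
      pv_getD_set _ _ _ _ (by omega)]
  by_cases e : (j : Int) = i
  · have hji : j = i.toNat := by omega
    rw [if_pos hji, if_pos e, hji]
  · have hji : ¬ j = i.toNat := by omega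
    rw [if_neg hji, if_neg e, add_zero]

lemma pvStepA_length (W : Int) (row : List Char) (curr : List Int) (p : Int × Int) :
    (pvStepA W row curr p).length = curr.length := by
  unfold pvStepA
  split_ifs <;> simp [PySem.List.length_pySetD, apply_ite List.length]

lemma pvStepA_getD (W : Int) (row : List Char) (curr : List Int) (col c : Int) (j : Nat)
    (h0 : 0 ≤ col) (h1 : col < (curr.length : Int)) (hW : W = (curr.length : Int)) :
    (pvStepA W row curr (col, c)).getD j 0 = curr.getD j 0 + pvContrib W row col c j := by
  unfold pvStepA pvContrib
  by_cases hc : c = 0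
  · subst hc
    rw [if_pos rfl]
    split_ifs <;> simp
  · rw [if_neg hc]
    by_cases hch : PySem.List.pyGetD row col ' ' = '^' <;>
      simp only [hch, ite_true, ite_false]
    · by_cases hl : (0:Int) ≤ col - 1
      · rw [if_pos hl]
        by_cases hr : col + 1 < W
        · rw [if_pos hr,
              pv_bump_getD _ _ _ _ (by omega) (by rw [PySem.List.length_pySetD]; omega),
              pv_bump_getD _ _ _ _ hl (by omega)]
          all_goals omega
        · rw [if_neg hr, pv_bump_getD _ _ _ _ hl (by omega)]
          all_goals omega
      · rw [if_neg hl]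
        by_cases hr : col + 1 < W
        · rw [if_pos hr, pv_bump_getD _ _ _ _ (by omega) (by omega)]
          all_goals omega
        · rw [if_neg hr]
          all_goals omega
    · rw [pv_bump_getD _ _ _ _ h0 h1]
      all_goals omega

lemma pvFoldA_length (W : Int) (row : List Char) :
    ∀ (ps : List (Int × Int)) (curr : List Int),
      (ps.foldl (pvStepA W row) curr).length = curr.length := by
  intro ps
  induction ps with
  | nil => intro curr; rfl
  | cons p t ih => intro curr; simp only [List.foldl_cons]; rw [ih, pvStepA_length]

lemma pvFoldA_getD (W : Int) (row : List Char) :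
    ∀ (ps : List (Int × Int)) (curr : List Int), W = (curr.length : Int) →
      (∀ p ∈ ps, 0 ≤ p.1 ∧ p.1 < W) → ∀ (j : Nat),
      (ps.foldl (pvStepA W row) curr).getD j 0
        = curr.getD j 0 + (ps.map (fun p => pvContrib W row p.1 p.2 (j : Int))).sum := by
  intro ps
  induction ps with
  | nil => intro curr _ _ j; simp
  | cons p t ih =>
    intro curr hW hps j
    have hp := hps p (by simp)
    have hlen : (pvStepA W row curr p).length = curr.length := pvStepA_length W row curr p
    simp only [List.foldl_cons, List.map_cons, List.sum_cons]
    rw [ih (pvStepA W row curr p) (by rw [hlen]; exact hW)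
          (fun q hq => hps q (by simp [hq])) j]
    rcases p with ⟨col, c⟩
    rw [pvStepA_getD W row curr col c j hp.1 (by omega) hW]
    ring

lemma pv_sum_ite_single (n c : Nat) (P : Nat → Prop) [DecidablePred P] (v : Nat → Int)
    (h : ∀ i, P i → i = c) :
    (∑ i ∈ Finset.range n, if P i then v i else 0) = if c < n ∧ P c then v c else 0 := by
  by_cases hc : c < n ∧ P c
  · rw [Finset.sum_eq_single_of_mem c (Finset.mem_range.mpr hc.1)
        (fun i _ hi => by rw [if_neg (fun hPi => hi (h i hPi))]), if_pos hc.2, if_pos hc]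
  · rw [Finset.sum_eq_zero, if_neg hc]
    intro i hi
    by_cases hPi : P i
    · exact absurd ⟨by rcases h i hPi with rfl; exact Finset.mem_range.mp hi, by rwa [← h i hPi]⟩ hc
    · simp [hPi]

lemma pv_sum_range_map (n : Nat) (f : Nat → Int) :
    ((List.range n).map f).sum = ∑ i ∈ Finset.range n, f i := by
  induction n with
  | zero => simp
  | succ m ih => rw [List.range_succ, Finset.sum_range_succ, List.map_append, List.sum_append, ih]; simp

-- A's scatter row, element-wise: destination j collects the contributions of all source columns
lemma pvScatter_getD (row : List Char) (v : List Int) (j : Nat) :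
    (pvScatterRow ((v.length : Nat) : Int) row v).getD j 0
      = ∑ i ∈ Finset.range v.length,
          pvContrib (v.length : Int) row (i : Int) (v.getD i 0) (j : Int) := by
  unfold pvScatterRow
  rw [pvFoldA_getD (v.length : Int) row (PySem.List.enumerate v)
        (List.replicate ((v.length : Int)).toNat 0) (by simp)
        (fun p hp => by
          rcases (PySem.List.mem_enumerate_iff v 0 p).mp hp with ⟨k, hk, rfl⟩
          constructor <;> simp <;> omega) j]
  rw [PySem.List.enumerate_eq_map_pyRange v 0]
  simp only [PySem.List.len_eq]
  rw [PySem.List.pyRange_zero_nat, List.map_map, List.map_map, pv_sum_range_map]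
  have hrep : (List.replicate ((v.length : Int)).toNat (0:Int)).getD j 0 = 0 := by
    rw [List.getD_eq_getElem?_getD, List.getElem?_replicate]
    split_ifs <;> rfl
  rw [hrep, zero_add]
  refine Finset.sum_congr rfl (fun i _ => ?_)
  simp only [Function.comp_apply]
  rw [PySem.List.pyGetD_of_nonneg _ _ (by positivity), Int.toNat_natCast]

lemma pvContrib_swap (W : Int) (row : List Char) (i c j d : Int) :
    pvContrib W row i c j * d = c * pvContrib W row i d j := by
  unfold pvContrib
  split_ifs <;> ring

-- B's reverse-DP cell value as a row of contributions of the same transition matrix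
lemma pvBack_eq_sum (n : Nat) (row : List Char) (w : List Int) (i : Nat) (hi : i < n) :
    pvBack (n : Int) row w (i : Int)
      = ∑ j ∈ Finset.range n, pvContrib (n : Int) row (i : Int) (w.getD j 0) (j : Int) := by
  have hterm : ∀ j ∈ Finset.range n,
      pvContrib (n : Int) row (i : Int) (w.getD j 0) (j : Int)
        = (if (¬ row.getD i ' ' = '^') ∧ j = i then w.getD j 0 else 0)
        + (if row.getD i ' ' = '^' ∧ 1 ≤ i ∧ j + 1 = i then w.getD j 0 else 0)
        + (if row.getD i ' ' = '^' ∧ i + 1 < n ∧ j = i + 1 then w.getD j 0 else 0) := by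
    intro j _
    unfold pvContrib
    rw [PySem.List.pyGetD_of_nonneg _ _ (by positivity), Int.toNat_natCast]
    by_cases hch : row.getD i ' ' = '^' <;>
      simp only [hch, ite_true, ite_false, not_true, not_false_iff, true_and, false_and] <;>
      split_ifs <;> omega
  rw [Finset.sum_congr rfl hterm, Finset.sum_add_distrib, Finset.sum_add_distrib,
      pv_sum_ite_single n i _ _ (fun j hj => hj.2),
      pv_sum_ite_single n (i-1) _ _ (fun j hj => by obtain ⟨-, h1, h2⟩ := hj; omega),
      pv_sum_ite_single n (i+1) _ _ (fun j hj => hj.2.2)]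
  unfold pvBack
  rw [PySem.List.pyGetD_of_nonneg row (d := ' ') (by positivity : (0:Int) ≤ (i:Int)),
      Int.toNat_natCast]
  by_cases hch : row.getD i ' ' = '^'
  · rw [if_pos hch,
        if_neg (fun h => h.2.1 hch : ¬ (i < n ∧ (¬ row.getD i ' ' = '^') ∧ i = i))]
    by_cases h1 : 1 ≤ i
    · rw [if_pos (by exact_mod_cast h1 : (1:Int) ≤ (i:Int)),
          PySem.List.pyGetD_of_nonneg w (d := 0) (by omega : (0:Int) ≤ (i:Int) - 1),
          (by omega : ((i:Int) - 1).toNat = i - 1),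
          if_pos (⟨by omega, hch, h1, by omega⟩ :
            i - 1 < n ∧ row.getD i ' ' = '^' ∧ 1 ≤ i ∧ i - 1 + 1 = i)]
      by_cases h2 : i + 1 < n
      · rw [if_pos (by exact_mod_cast h2 : (i:Int) + 1 < (n:Int)),
            PySem.List.pyGetD_of_nonneg w (d := 0) (by omega : (0:Int) ≤ (i:Int) + 1),
            (by omega : ((i:Int) + 1).toNat = i + 1),
            if_pos (⟨h2, hch, h2, rfl⟩ :
              i + 1 < n ∧ row.getD i ' ' = '^' ∧ i + 1 < n ∧ i + 1 = i + 1)]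
        ring
      · rw [if_neg (fun h => h2 (by exact_mod_cast h) : ¬ ((i:Int) + 1 < (n:Int))),
            if_neg (fun h => h2 h.2.2.1 :
              ¬ (i + 1 < n ∧ row.getD i ' ' = '^' ∧ i + 1 < n ∧ i + 1 = i + 1))]
        ring
    · rw [if_neg (fun h => h1 (by exact_mod_cast h) : ¬ ((1:Int) ≤ (i:Int))),
          if_neg (fun h => h1 h.2.2.1 :
            ¬ (i - 1 < n ∧ row.getD i ' ' = '^' ∧ 1 ≤ i ∧ i - 1 + 1 = i))]
      by_cases h2 : i + 1 < n
      · rw [if_pos (by exact_mod_cast h2 : (i:Int) + 1 < (n:Int)),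
            PySem.List.pyGetD_of_nonneg w (d := 0) (by omega : (0:Int) ≤ (i:Int) + 1),
            (by omega : ((i:Int) + 1).toNat = i + 1),
            if_pos (⟨h2, hch, h2, rfl⟩ :
              i + 1 < n ∧ row.getD i ' ' = '^' ∧ i + 1 < n ∧ i + 1 = i + 1)]
        ring
      · rw [if_neg (fun h => h2 (by exact_mod_cast h) : ¬ ((i:Int) + 1 < (n:Int))),
            if_neg (fun h => h2 h.2.2.1 :
              ¬ (i + 1 < n ∧ row.getD i ' ' = '^' ∧ i + 1 < n ∧ i + 1 = i + 1))]
        ring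
  · rw [if_neg hch,
        PySem.List.pyGetD_of_nonneg w (d := 0) (by positivity : (0:Int) ≤ (i:Int)),
        Int.toNat_natCast,
        if_pos (⟨hi, hch, rfl⟩ : i < n ∧ (¬ row.getD i ' ' = '^') ∧ i = i),
        if_neg (fun h => hch h.2.1 :
          ¬ (i - 1 < n ∧ row.getD i ' ' = '^' ∧ 1 ≤ i ∧ i - 1 + 1 = i)),
        if_neg (fun h => hch h.2.1 :
          ¬ (i + 1 < n ∧ row.getD i ' ' = '^' ∧ i + 1 < n ∧ i + 1 = i + 1))]
    ring

lemma pvBackRow_getD (n : Nat) (row : List Char) (w : List Int) (i : Nat) (hi : i < n) :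
    (pvBackRow (n : Int) row w).getD i 0 = pvBack (n : Int) row w (i : Int) := by
  have hi' : i < ((PySem.List.pyRange 0 (n:Int)).map (pvBack (n:Int) row w)).length := by
    simpa [PySem.List.length_pyRange_one] using hi
  rw [pvBackRow, List.getD_eq_getElem _ 0 hi', List.getElem_map, PySem.List.getElem_pyRange_one]
  norm_num

-- the transposition: scatter forward against a weight vector = weigh against the pulled-back vector
lemma pv_adjoint (n : Nat) (row : List Char) (v w : List Int) (hv : v.length = n) :
    (∑ j ∈ Finset.range n, (pvScatterRow (n : Int) row v).getD j 0 * w.getD j 0)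
      = ∑ i ∈ Finset.range n, v.getD i 0 * pvBack (n : Int) row w (i : Int) := by
  subst hv
  calc (∑ j ∈ Finset.range v.length, (pvScatterRow (v.length : Int) row v).getD j 0 * w.getD j 0)
      = ∑ j ∈ Finset.range v.length, ∑ i ∈ Finset.range v.length,
          pvContrib (v.length : Int) row (i : Int) (v.getD i 0) (j : Int) * w.getD j 0 := by
        refine Finset.sum_congr rfl (fun j _ => ?_)
        rw [pvScatter_getD, Finset.sum_mul]
    _ = ∑ i ∈ Finset.range v.length, ∑ j ∈ Finset.range v.length,
          pvContrib (v.length : Int) row (i : Int) (v.getD i 0) (j : Int) * w.getD j 0 :=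
        Finset.sum_comm
    _ = ∑ i ∈ Finset.range v.length, v.getD i 0 * pvBack (v.length : Int) row w (i : Int) := by
        refine Finset.sum_congr rfl (fun i hi => ?_)
        rw [pvBack_eq_sum v.length row w i (Finset.mem_range.mp hi), Finset.mul_sum]
        exact Finset.sum_congr rfl (fun j _ => pvContrib_swap _ _ _ _ _ _)

lemma pv_list_sum (v : List Int) : v.sum = ∑ i ∈ Finset.range v.length, v.getD i 0 := by
  induction v with
  | nil => simp
  | cons a t ih =>
    rw [List.sum_cons, List.length_cons, Finset.sum_range_succ', ih]
    simp [add_comm]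

-- main invariant: forward scatter fold summed against final weights = initial weights against reverse DP
lemma pv_main (n : Nat) :
    ∀ (rs : List (List Char)) (v : List Int), v.length = n →
      (rs.foldl (fun p r => pvScatterRow (n : Int) r p) v).sum
        = ∑ i ∈ Finset.range n,
            v.getD i 0 * (rs.foldr (fun r w => pvBackRow (n : Int) r w) (List.replicate n 1)).getD i 0 := by
  intro rs
  induction rs with
  | nil =>
    intro v hv
    rw [List.foldl_nil, List.foldr_nil, pv_list_sum, hv]
    refine Finset.sum_congr rfl (fun i hi => ?_)
    have h1 : (List.replicate n (1:Int)).getD i 0 = 1 := by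
      rw [List.getD_eq_getElem?_getD, List.getElem?_replicate,
          if_pos (Finset.mem_range.mp hi)]
      rfl
    rw [h1, mul_one]
  | cons r t ih =>
    intro v hv
    have hlen : (pvScatterRow (n : Int) r v).length = n := by
      unfold pvScatterRow
      rw [pvFoldA_length]
      simp
    rw [List.foldl_cons, List.foldr_cons, ih (pvScatterRow (n : Int) r v) hlen]
    subst hv
    rw [pv_adjoint v.length r v _ rfl]
    exact Finset.sum_congr rfl (fun i hi =>
      by rw [pvBackRow_getD v.length r _ i (Finset.mem_range.mp hi)])

lemma pvInit_getD (n s : Nat) (hs : s < n) (i : Nat) :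
    (PySem.List.pySetD (List.replicate n (0:Int)) (s : Int) 1).getD i 0
      = if i = s then 1 else 0 := by
  rw [PySem.List.pySetD_of_nonneg _ _ (by positivity), Int.toNat_natCast,
      pv_getD_set _ _ _ _ (by simpa using hs)]
  by_cases h : i = s
  · simp [h]
  · rw [if_neg h, if_neg h, List.getD_eq_getElem?_getD, List.getElem?_replicate]
    split_ifs <;> rfl

-- ===== VERDICT (by name: the statement is the Claim_ definition above) =====
theorem part2_spec : Claim_equal_part2 := by
  intro data _ hpre
  show part2 data = part2_alt data
  obtain ⟨hne, hS, -⟩ := hpre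
  simp only [part2, part2_alt]
  rw [PySem.List.slice_from_one, ← List.drop_one, List.foldl_reverse,
      PySem.List.foldl_pyRange_pyGetD' (List.map (fun r => r.toList) data) []
        (fun p r => pvScatterRow ((((List.map (fun r => r.toList) data).headD []).length : Nat) : Int) r p) _
        (by norm_num : (0:Int) ≤ 1)]
  set rows := List.map (fun r => r.toList) data with hrows
  set first := rows.headD [] with hfirst
  have hSfirst : 'S' ∈ first := by
    cases data with
    | nil => exact absurd rfl hne
    | cons d t => simpa [hrows, hfirst] using hS
  obtain ⟨k, hk⟩ := Option.isSome_iff_exists.mp ((PySem.List.index?_isSome_iff _ _).mpr hSfirst)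
  obtain ⟨hklt, -, -⟩ := PySem.List.getElem_of_index?_eq_some hk
  rw [hk]
  simp only [Option.getD_some]
  rw [show ((first.length : Nat) : Int).toNat = first.length from Int.toNat_natCast _,
      pv_main first.length (rows.drop (1:Int).toNat)
        (PySem.List.pySetD (List.replicate first.length 0) ((k : Nat) : Int) 1)
        (by rw [PySem.List.length_pySetD]; simp)]
  rw [PySem.List.pyGetD_of_nonneg _ _ (by positivity), Int.toNat_natCast]
  rw [show (1:Int).toNat = 1 from rfl]
  have hfoldr : ∀ i ∈ Finset.range first.length,
      (PySem.List.pySetD (List.replicate first.length (0:Int)) ((k:Nat):Int) 1).getD i 0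
          * ((rows.drop 1).foldr (fun r w => pvBackRow ((first.length : Nat) : Int) r w)
              (List.replicate first.length 1)).getD i 0
        = (if i = k then 1 else 0)
          * ((rows.drop 1).foldr (fun r w => pvBackRow ((first.length : Nat) : Int) r w)
              (List.replicate first.length 1)).getD i 0 := by
    intro i _
    rw [pvInit_getD first.length k hklt i]
  rw [Finset.sum_congr rfl hfoldr]
  rw [Finset.sum_eq_single_of_mem k (Finset.mem_range.mpr hklt)
      (fun i _ hik => by rw [if_neg hik, zero_mul]), if_pos rfl, one_mul]
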